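-- pv_equiv track=rewrite | github.com/IlMinCho/Algorithm | swea/min_removals.py | min_removals
-- ===== SOURCE A (Python) =====
-- def min_removals(str):
--     count = 0
--     for s in str:
--         while True:
--             if s.find("aa") == 0:
--                 s = s.replace('a','',1)
--                 count += 1
--             elif s.find("bb") == 0:
--                 s = s.replace('b','',1)
--                 count += 1
--             elif s.find("ab") == 0:
--                 s = s.replace('ab','b',1)
--                 count += 1
--             elif s.find("ba") == 0:
--                 s = s.replace('ba','a',1)
--                 count += 1
--             else: break
--
--     return count
-- ===== SOURCE B (Python) =====
-- def min_removals(str):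
--     # Single pass per string: each while-iteration of the original strips the
--     # first character while the first two are both 'a'/'b', so the cost of a
--     # string is (length of its leading run of 'a'/'b' characters) - 1, if >= 2.
--     total = 0
--     for s in str:
--         r = 0
--         for ch in s:
--             if ch in 'ab':
--                 r += 1
--             else:
--                 break
--         if r > 1:
--             total += r - 1
--     return total
-- ===== Notes on version B (the rewrite author's own statement) =====
-- stated objective: faster
-- what changed: Replaces the quadratic while-loop of repeated find/replace string rebuilds with a single left-to-right scan that counts the leading run of 'a'/'b' characters and adds run-1.
import Mathlib
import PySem

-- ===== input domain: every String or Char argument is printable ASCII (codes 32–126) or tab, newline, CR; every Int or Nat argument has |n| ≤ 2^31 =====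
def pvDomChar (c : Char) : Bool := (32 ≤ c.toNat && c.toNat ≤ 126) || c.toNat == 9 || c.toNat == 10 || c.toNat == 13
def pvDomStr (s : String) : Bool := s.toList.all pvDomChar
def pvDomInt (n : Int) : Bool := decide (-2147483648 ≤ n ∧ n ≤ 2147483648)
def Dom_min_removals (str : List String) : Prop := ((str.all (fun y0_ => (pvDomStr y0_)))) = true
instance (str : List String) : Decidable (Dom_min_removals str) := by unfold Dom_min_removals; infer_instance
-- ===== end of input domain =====

-- B replaces A's quadratic repeated find/replace loop by a single scan adding (leading 'a'/'b'-run length - 1) per string; faster.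


-- ===== PORT A =====
-- s.replace(old, new, 1): exact whenever old is nonempty (the only uses here);
-- replaces the first occurrence of old, leaves s unchanged if old does not occur.
def pvReplace1 : List Char → List Char → List Char → List Char
  | [], _, _ => []
  | c :: rest, old, new =>
    if old.isPrefixOf (c :: rest) then new ++ (c :: rest).drop old.length
    else c :: pvReplace1 rest old new

-- the while loop of A; fuel bounds the number of iterations (each iteration
-- shortens s by one character, so fuel = s.length is always enough)
def pvLoopA : Nat → List Char → Int → Int
  | 0, _, count => count
  | fuel + 1, s, count =>
    if PySem.Chars.find s ['a','a'] = 0 then pvLoopA fuel (pvReplace1 s ['a'] []) (count + 1)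
    else if PySem.Chars.find s ['b','b'] = 0 then pvLoopA fuel (pvReplace1 s ['b'] []) (count + 1)
    else if PySem.Chars.find s ['a','b'] = 0 then pvLoopA fuel (pvReplace1 s ['a','b'] ['b']) (count + 1)
    else if PySem.Chars.find s ['b','a'] = 0 then pvLoopA fuel (pvReplace1 s ['b','a'] ['a']) (count + 1)
    else count

def min_removals (str : List String) : Int :=
  str.foldl (fun count s => pvLoopA s.toList.length s.toList count) 0

-- ===== PORT B =====
-- the inner for-loop of B: length of the leading run of 'a'/'b' characters
def pvRun : List Char → Nat
  | [] => 0
  | c :: rest => if c = 'a' ∨ c = 'b' then pvRun rest + 1 else 0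

def min_removals_alt (str : List String) : Int :=
  str.foldl (fun total s =>
    let r := pvRun s.toList
    if 1 < r then total + ((r : Int) - 1) else total) 0

-- ===== PRECONDITION & SPEC =====
def Spec_min_removals (str : List String) (out : Int) : Prop := out = min_removals_alt str
instance (str : List String) (out : Int) : Decidable (Spec_min_removals str out) := by unfold Spec_min_removals; infer_instance

-- ===== CLAIM (what is proved, stated in full; the proofs are below) =====
def Claim_equal_min_removals : Prop := ∀ (str : List String), Dom_min_removals str → Spec_min_removals str (min_removals str)

-- ===== LEMMAS AND PROOFS =====

theorem pvFindGo_pos_ne_zero (sub : List Char) (t : List Char) (k : Nat) (hk : 0 < k) :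
    PySem.Chars.find.go sub t k ≠ 0 := by
  induction t generalizing k with
  | nil =>
    simp only [PySem.Chars.find.go]
    split <;> omega
  | cons h t ih =>
    simp only [PySem.Chars.find.go]
    split
    · omega
    · exact ih (k + 1) (by omega)

theorem pvFind_eq_zero_iff (cs sub : List Char) :
    PySem.Chars.find cs sub = 0 ↔ sub <+: cs := by
  cases cs with
  | nil =>
    simp only [PySem.Chars.find, PySem.Chars.find.go, List.prefix_nil]
    constructor
    · intro h; by_cases he : sub.isEmpty <;> simp_all [List.isEmpty_iff]
    · intro h; simp [h]
  | cons c t =>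
    simp only [PySem.Chars.find, PySem.Chars.find.go]
    by_cases h : sub.isPrefixOf (c :: t)
    · rw [if_pos h]
      simpa [List.isPrefixOf_iff_prefix] using h
    · rw [if_neg h]
      simp only [List.isPrefixOf_iff_prefix] at h
      exact ⟨fun hz => absurd hz (by simpa using pvFindGo_pos_ne_zero sub t 1 one_pos), fun hp => absurd hp h⟩

theorem pvLoopA_eq (fuel : Nat) (cs : List Char) (count : Int) (h : cs.length ≤ fuel) :
    pvLoopA fuel cs count = count + (if 1 < pvRun cs then (pvRun cs : Int) - 1 else 0) := by
  induction fuel generalizing cs count with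
  | zero =>
    have : cs = [] := List.eq_nil_of_length_eq_zero (by omega)
    subst this; simp [pvLoopA, pvRun]
  | succ fuel ih =>
    match cs with
    | [] => simp [pvLoopA, pvRun, pvFind_eq_zero_iff]
    | [c] =>
      simp only [pvLoopA, pvFind_eq_zero_iff]
      have h2 : ∀ x y : Char, ¬ ([x, y] <+: [c]) := by
        intro x y hp; simpa using hp.length_le
      simp only [h2, if_false, pvRun]
      split <;> simp
    | c1 :: c2 :: rest =>
      have hpre : ∀ x y : Char, [x, y] <+: (c1 :: c2 :: rest) ↔ x = c1 ∧ y = c2 := by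
        intro x y
        simp [List.cons_prefix_cons, eq_comm]
      by_cases h1 : c1 = 'a' ∨ c1 = 'b'
      · by_cases h2 : c2 = 'a' ∨ c2 = 'b'
        · -- the loop strips c1 and recurses on c2 :: rest
          have hlen : (c2 :: rest).length ≤ fuel := by simp at h ⊢; omega
          have hrun : pvRun (c1 :: c2 :: rest) = pvRun (c2 :: rest) + 1 := by
            simp [pvRun, h1]
          have hrun2 : 1 ≤ pvRun (c2 :: rest) := by simp [pvRun, h2]
          have key : pvLoopA (fuel + 1) (c1 :: c2 :: rest) count
              = pvLoopA fuel (c2 :: rest) (count + 1) := by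
            rcases h1 with h1 | h1 <;> rcases h2 with h2 | h2 <;> subst h1 <;> subst h2 <;>
              simp [pvLoopA, pvFind_eq_zero_iff, hpre, pvReplace1]
          rw [key, ih (c2 :: rest) (count + 1) hlen, hrun]
          have := hrun2
          split <;> split <;> push_cast <;> omega
        · -- second char breaks the run: no branch fires, run = 1
          have hstop : pvLoopA (fuel + 1) (c1 :: c2 :: rest) count = count := by
            simp only [pvLoopA, pvFind_eq_zero_iff, hpre]
            have : ∀ x y : Char, (y = 'a' ∨ y = 'b') → ¬ (x = c1 ∧ y = c2) := by
              rintro x y hy ⟨_, rfl⟩; exact h2 hy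
            simp [this 'a' 'a' (Or.inl rfl), this 'b' 'b' (Or.inr rfl),
                  this 'a' 'b' (Or.inr rfl), this 'b' 'a' (Or.inl rfl)]
          rw [hstop]
          have : pvRun (c1 :: c2 :: rest) = 1 := by simp [pvRun, h1, h2]
          simp [this]
      · -- first char is not 'a'/'b': no branch fires, run = 0
        have hstop : pvLoopA (fuel + 1) (c1 :: c2 :: rest) count = count := by
          simp only [pvLoopA, pvFind_eq_zero_iff, hpre]
          have : ∀ x y : Char, (x = 'a' ∨ x = 'b') → ¬ (x = c1 ∧ y = c2) := by
            rintro x y hx ⟨rfl, _⟩; exact h1 hx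
          simp [this 'a' 'a' (Or.inl rfl), this 'b' 'b' (Or.inr rfl),
                this 'a' 'b' (Or.inl rfl), this 'b' 'a' (Or.inr rfl)]
        rw [hstop]
        have : pvRun (c1 :: c2 :: rest) = 0 := by simp [pvRun, h1]
        simp [this]

theorem pvFold_eq (l : List String) (acc : Int) :
    l.foldl (fun count s => pvLoopA s.toList.length s.toList count) acc
      = l.foldl (fun total s =>
          let r := pvRun s.toList
          if 1 < r then total + ((r : Int) - 1) else total) acc := by
  induction l generalizing acc with
  | nil => rfl
  | cons s t ih =>
    simp only [List.foldl_cons]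
    rw [pvLoopA_eq s.toList.length s.toList acc (le_refl _), ih]
    split <;> simp

-- ===== VERDICT (by name: the statement is the Claim_ definition above) =====
theorem min_removals_spec : Claim_equal_min_removals := by
  intro str _
  unfold Spec_min_removals min_removals min_removals_alt
  exact pvFold_eq str 0
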